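-- pv_equiv track=rewrite | github.com/alistairboyer/DigitalFutures | Functions/nwise.py | nwise
-- ===== SOURCE A (Python) =====
-- from typing import Sequence, Generator, Tuple, Optional, Any
--
-- def nwise(
--     sequence: Sequence[Any], n: int = 3, exhaust: Optional[bool] = None
-- ) -> Generator[Tuple[Any, ...], None, None]:
--     """
--     yield tuple of n values from a sequence
--     see also: `itertools.batched()`
--
--     Paramaters:
--         sequence (Sequence[Any]):
--             sequence from which to take elements in n-wise groups
--         n (int):
--             size of group to take
--         exhaust (bool, optional):
--             When True: pads out the return values with None for the last set.
--             When False: truncates leftover data that can't fill n values.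
--             When None: raises exception if data does not fit shape of n.
--             Defaults to None.
--     Yields:
--         Tuple[Any, ...]
--     """
--
--     assert int(n) > 0, "n must be an integer value greater than z"
--
--     def n_minus_one_times() -> Generator[Any, None, None]:
--         """yield from idata n-1 times times"""
--         for _ in range(int(n) - 1):
--             try:
--                 yield (next(idata))
--             except StopIteration as e:
--                 # catch StopIteration here to pad with None
--                 if exhaust is True:
--                     yield None
--                     continue
--                 # or pass up to next level
--                 raise e
--
--     idata = iter(sequence)
--     for val in idata:
--         try:
--             yield (val, *n_minus_one_times())
--         except (StopIteration, RuntimeError):  # https://peps.python.org/pep-0479/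
--             # catch here to truncate
--             if exhaust is False:
--                 return
--             # exhaust is None so raise ValueError
--             raise ValueError(f"The values do not fit shape {n}")
-- ===== SOURCE B (Python) =====
-- def nwise(sequence, n=3, exhaust=None):
--     assert int(n) > 0, "n must be an integer value greater than z"
--     size = int(n)
--     buf = []
--     for val in sequence:
--         buf.append(val)
--         if len(buf) == size:
--             yield tuple(buf)
--             buf = []
--     if buf:
--         if exhaust is True:
--             yield tuple(buf) + (None,) * (size - len(buf))
--         elif exhaust is False:
--             return
--         else:
--             raise ValueError(f"The values do not fit shape {n}")
-- ===== Notes on version B (the rewrite author's own statement) =====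
-- stated objective: simpler
-- what changed: Replaced the nested generator with exception-based control flow (inner generator yielding n-1 items, StopIteration/RuntimeError caught to decide truncation/error) by a single loop that appends to a buffer, flushes it as a tuple when full, and handles the leftover buffer explicitly after the loop.
-- outside the precondition, e.g. on nwise([1, 2, 3], 2, True): A returns [(1, 2), (3, None)], B returns [(1, 2), (3, None)]; on nwise([1, 2, 3], 2, None): A raises ValueError, B raises ValueError; on nwise([1], 0, None): A raises AssertionError, B raises AssertionError
import Mathlib
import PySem

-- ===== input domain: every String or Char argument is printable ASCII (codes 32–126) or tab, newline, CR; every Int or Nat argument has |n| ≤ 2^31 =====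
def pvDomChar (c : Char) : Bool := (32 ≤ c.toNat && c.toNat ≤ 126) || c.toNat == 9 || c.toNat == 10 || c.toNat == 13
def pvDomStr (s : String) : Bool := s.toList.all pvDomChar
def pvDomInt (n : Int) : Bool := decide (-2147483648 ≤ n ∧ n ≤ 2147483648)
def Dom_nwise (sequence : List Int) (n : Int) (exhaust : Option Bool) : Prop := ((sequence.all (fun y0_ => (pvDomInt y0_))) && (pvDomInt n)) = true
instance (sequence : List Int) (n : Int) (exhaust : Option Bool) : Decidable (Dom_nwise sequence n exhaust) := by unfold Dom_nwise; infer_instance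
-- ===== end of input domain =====

-- B replaces A's nested generator and exception-driven control flow by one buffer-flushing loop;
-- objective "simpler" (same linear cost). Both are generators; equivalence is about the yielded list.

-- ===== PORT A =====
-- A's inner generator n_minus_one_times: pull k = int(n)-1 elements from the iterator (the
-- remaining list).  `none` models the StopIteration/RuntimeError that escapes to the outer loop.
-- The `exhaust is True` padding branch yields Python None, which List Int cannot represent;
-- Pre_nwise excludes the inputs that reach it, and the port returns the unpadded group there.
def nwiseTakeA (exhaust : Option Bool) : Nat → List Int → Option (List Int × List Int)
  | 0, rest => some ([], rest)
  | k + 1, [] =>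
      if exhaust = some true then some ([], [])   -- pads with None; unreachable under Pre_nwise
      else none                                    -- raise StopIteration to the outer level
  | k + 1, x :: rest =>
      match nwiseTakeA exhaust k rest with
      | some (g, r) => some (x :: g, r)
      | none => none

theorem nwiseTakeA_length_le (exhaust : Option Bool) :
    ∀ (k : Nat) (rest g r : List Int), nwiseTakeA exhaust k rest = some (g, r) → r.length ≤ rest.length := by
  intro k
  induction k with
  | zero => intro rest g r h; simp [nwiseTakeA] at h; rw [h.2]
  | succ k ih =>
      intro rest g r h
      cases rest with
      | nil =>
          simp only [nwiseTakeA] at h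
          split at h
          · cases h; simp
          · cases h
      | cons x rest =>
          simp only [nwiseTakeA] at h
          cases hrec : nwiseTakeA exhaust k rest with
          | none => rw [hrec] at h; cases h
          | some p =>
              rw [hrec] at h
              cases h
              have := ih rest p.1 p.2 (by rw [hrec])
              simpa using Nat.le_succ_of_le this

-- outer loop: `for val in idata: yield (val, *n_minus_one_times())`, catching the inner
-- StopIteration/RuntimeError: truncate when exhaust is False, else ValueError (excluded by Pre_nwise).
def nwiseGoA (nn : Nat) (exhaust : Option Bool) : List Int → List (List Int)
  | [] => []
  | v :: rest =>
      match h : nwiseTakeA exhaust nn rest with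
      | some (g, rest') => (v :: g) :: nwiseGoA nn exhaust rest'
      | none => []   -- exhaust is False: return; otherwise ValueError (excluded by Pre_nwise)
  termination_by xs => xs.length
  decreasing_by
    have := nwiseTakeA_length_le exhaust nn rest g rest' h
    simp; omega

def nwise (sequence : List Int) (n : Int) (exhaust : Option Bool) : List (List Int) :=
  if n ≤ 0 then []   -- assert int(n) > 0 fails: AssertionError, excluded by Pre_nwise
  else nwiseGoA (n - 1).toNat exhaust sequence

-- ===== PORT B =====
-- B's single loop: append each value to buf, flush as a group when |buf| = size; afterwards
-- handle the leftover buffer explicitly (pad / truncate / raise, the latter two outside Pre_nwise).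
def nwiseGoB (size : Nat) (exhaust : Option Bool) : List Int → List Int → List (List Int)
  | buf, [] =>
      if buf = [] then []
      else match exhaust with
        | some true => [buf]   -- Python pads with (None,)*(size-len(buf)); unreachable under Pre_nwise
        | some false => []
        | none => []           -- raise ValueError, excluded by Pre_nwise
  | buf, v :: rest =>
      if (buf ++ [v]).length = size then (buf ++ [v]) :: nwiseGoB size exhaust [] rest
      else nwiseGoB size exhaust (buf ++ [v]) rest

def nwise_alt (sequence : List Int) (n : Int) (exhaust : Option Bool) : List (List Int) :=
  if n ≤ 0 then []   -- assert, outside Pre_nwise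
  else nwiseGoB n.toNat exhaust [] sequence

-- ===== PRECONDITION & SPEC =====
-- Pre_nwise excludes: n ≤ 0 (AssertionError); exhaust = None with len(sequence) not a multiple of n
-- (ValueError); and exhaust = True with len(sequence) not a multiple of n, where A returns tuples
-- PADDED WITH Python None — not a value of type List Int, hence unportable under the type convention.
def Pre_nwise (sequence : List Int) (n : Int) (exhaust : Option Bool) : Prop :=
  0 < n ∧ (exhaust = some false ∨ n.toNat ∣ sequence.length)
instance (sequence : List Int) (n : Int) (exhaust : Option Bool) : Decidable (Pre_nwise sequence n exhaust) := by unfold Pre_nwise; infer_instance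

def pvWitness_nwise : List Int × Int × Option Bool := ([1, 2, 3, 4], 2, none)

def Spec_nwise (sequence : List Int) (n : Int) (exhaust : Option Bool) (out : List (List Int)) : Prop := out = nwise_alt sequence n exhaust
instance (sequence : List Int) (n : Int) (exhaust : Option Bool) (out : List (List Int)) : Decidable (Spec_nwise sequence n exhaust out) := by unfold Spec_nwise; infer_instance

-- ===== CLAIM (what is proved, stated in full; the proofs are below) =====
def Claim_equal_nwise : Prop := ∀ (sequence : List Int) (n : Int) (exhaust : Option Bool), Dom_nwise sequence n exhaust → Pre_nwise sequence n exhaust → Spec_nwise sequence n exhaust (nwise sequence n exhaust)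

-- ===== LEMMAS AND PROOFS =====

-- reference chunking both loops are reduced to
def nwiseE (size : Nat) (exhaust : Option Bool) (ys : List Int) : List (List Int) :=
  if h : 0 < size ∧ size ≤ ys.length then
    ys.take size :: nwiseE size exhaust (ys.drop size)
  else if ys = [] then []
  else match exhaust with
    | some true => [ys]
    | some false => []
    | none => []
  termination_by ys.length
  decreasing_by simp; omega

theorem takeA_of_le (exhaust : Option Bool) :
    ∀ (k : Nat) (rest : List Int), k ≤ rest.length →
      nwiseTakeA exhaust k rest = some (rest.take k, rest.drop k) := by
  intro k
  induction k with
  | zero => intro rest _; simp [nwiseTakeA]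
  | succ k ih =>
      intro rest hle
      cases rest with
      | nil => simp at hle
      | cons x rest =>
          simp only [nwiseTakeA, ih rest (by simpa using hle)]
          simp

theorem goB_eq_E (size : Nat) (exhaust : Option Bool) :
    ∀ (xs buf : List Int), buf.length < size →
      nwiseGoB size exhaust buf xs = nwiseE size exhaust (buf ++ xs) := by
  intro xs
  induction xs with
  | nil =>
      intro buf hlt
      rw [nwiseE.eq_def]
      simp only [List.append_nil, nwiseGoB]
      have : ¬ (0 < size ∧ size ≤ buf.length) := by omega
      rw [dif_neg this]
  | cons v rest ih =>
      intro buf hlt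
      simp only [nwiseGoB]
      by_cases hfull : (buf ++ [v]).length = size
      · rw [if_pos hfull]
        rw [nwiseE.eq_def]
        have hlen : size ≤ (buf ++ v :: rest).length := by
          simp at hfull ⊢; omega
        have hpos : 0 < size := by simp at hfull; omega
        rw [dif_pos ⟨hpos, hlen⟩]
        have htake : (buf ++ v :: rest).take size = buf ++ [v] := by
          have : buf ++ v :: rest = (buf ++ [v]) ++ rest := by simp
          rw [this, List.take_append_of_le_length (by omega), List.take_of_length_le (by omega)]
        have hdrop : (buf ++ v :: rest).drop size = rest := by
          have : buf ++ v :: rest = (buf ++ [v]) ++ rest := by simp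
          rw [this, ← hfull, List.drop_left]
        rw [htake, hdrop, ih [] (by simpa using hpos)]
        simp
      · rw [if_neg hfull]
        have : (buf ++ [v]).length < size := by simp at hfull ⊢; omega
        rw [ih (buf ++ [v]) this]
        simp

theorem takeA_none_of_lt :
    ∀ (k : Nat) (rest : List Int), rest.length < k → nwiseTakeA (some false) k rest = none := by
  intro k
  induction k with
  | zero => intro rest h; omega
  | succ m ih =>
      intro rest h
      cases rest with
      | nil => simp [nwiseTakeA]
      | cons x r => simp [nwiseTakeA, ih r (by simpa using Nat.lt_of_succ_lt_succ h)]

theorem goA_eq_E (size : Nat) (exhaust : Option Bool) (hpos : 0 < size) :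
    ∀ (xs : List Int), (exhaust = some false ∨ size ∣ xs.length) →
      nwiseGoA (size - 1) exhaust xs = nwiseE size exhaust xs := by
  intro xs
  induction hw : xs.length using Nat.strong_induction_on generalizing xs with
  | _ len ih =>
    intro hC
    subst hw
    cases xs with
    | nil =>
        rw [nwiseE.eq_def]
        have : ¬ (0 < size ∧ size ≤ ([] : List Int).length) := by simp; omega
        rw [dif_neg this]
        simp [nwiseGoA]
    | cons v rest =>
        by_cases hlen : size ≤ (v :: rest).length
        · -- full group available
          have hk : size - 1 ≤ rest.length := by simp at hlen ⊢; omega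
          rw [nwiseGoA]
          rw [takeA_of_le exhaust (size - 1) rest hk]
          rw [nwiseE.eq_def, dif_pos ⟨hpos, hlen⟩]
          have htake : (v :: rest).take size = v :: rest.take (size - 1) := by
            cases size with
            | zero => omega
            | succ m => simp
          have hdrop : (v :: rest).drop size = rest.drop (size - 1) := by
            cases size with
            | zero => omega
            | succ m => simp
          rw [htake, hdrop]
          have hlt : (rest.drop (size - 1)).length < (v :: rest).length := by
            simp only [List.length_drop, List.length_cons]; omega
          have hC' : exhaust = some false ∨ size ∣ (rest.drop (size - 1)).length := by
            rcases hC with h | h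
            · exact Or.inl h
            · right
              have : (rest.drop (size - 1)).length = (v :: rest).length - size := by
                simp only [List.length_drop, List.length_cons]; omega
              rw [this]
              exact Nat.dvd_sub h dvd_rfl
          change (v :: rest.take (size - 1)) :: nwiseGoA (size - 1) exhaust (rest.drop (size - 1)) = _
          rw [ih _ hlt _ rfl hC']
        · -- short tail: under Pre_ we must have exhaust = some false
          have hfalse : exhaust = some false := by
            rcases hC with h | h
            · exact h
            · exfalso
              have h1 : 0 < (v :: rest).length := by simp
              have := Nat.le_of_dvd h1 h
              omega
          subst hfalse
          rw [nwiseGoA]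
          have hk : rest.length < size - 1 := by simp at hlen; omega
          rw [takeA_none_of_lt (size - 1) rest hk]
          rw [nwiseE.eq_def]
          have : ¬ (0 < size ∧ size ≤ (v :: rest).length) := by
            simp at hlen ⊢; omega
          rw [dif_neg this]
          simp

-- ===== VERDICT (by name: the statement is the Claim_ definition above) =====
theorem nwise_spec : Claim_equal_nwise := by
  intro sequence n exhaust _ hpre
  obtain ⟨hn, hC⟩ := hpre
  unfold Spec_nwise nwise nwise_alt
  rw [if_neg (by omega), if_neg (by omega)]
  have hsz : 0 < n.toNat := by omega
  have h1 : (n - 1).toNat = n.toNat - 1 := by omega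
  rw [h1, goA_eq_E n.toNat exhaust hsz sequence hC,
      goB_eq_E n.toNat exhaust sequence [] (by simpa using hsz)]
  simp
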